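-- pv_equiv track=rewrite | github.com/adhoki/interview-practice | arrays_strings.py | isStringPermutation
-- ===== SOURCE A (Python) =====
-- def isStringPermutation(s1, s2):
--     #
--
--     if len(s1) != len(s2):
--         return False
--
--     # maintain characters with number of occurrences in a hash-table
--     s1_hash, s2_hash = {}, {}
--     for char in s1:
--         if char in s1_hash:
--             s1_hash[char] += 1
--         else:
--             s1_hash[char] = 1
--     for char in s2:
--         if char in s2_hash:
--             s2_hash[char] += 1
--         else:
--             s2_hash[char] = 1
--
--     if s1_hash == s2_hash:
--         return True
--
--     return False
-- ===== SOURCE B (Python) =====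
-- def isStringPermutation(s1, s2):
--     return sorted(s1) == sorted(s2)
-- ===== Notes on version B (the rewrite author's own statement) =====
-- stated objective: simpler
-- what changed: Replaces the two hash-table frequency counts and dict comparison with a one-line sort-and-compare of the character sequences.
import Mathlib
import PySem

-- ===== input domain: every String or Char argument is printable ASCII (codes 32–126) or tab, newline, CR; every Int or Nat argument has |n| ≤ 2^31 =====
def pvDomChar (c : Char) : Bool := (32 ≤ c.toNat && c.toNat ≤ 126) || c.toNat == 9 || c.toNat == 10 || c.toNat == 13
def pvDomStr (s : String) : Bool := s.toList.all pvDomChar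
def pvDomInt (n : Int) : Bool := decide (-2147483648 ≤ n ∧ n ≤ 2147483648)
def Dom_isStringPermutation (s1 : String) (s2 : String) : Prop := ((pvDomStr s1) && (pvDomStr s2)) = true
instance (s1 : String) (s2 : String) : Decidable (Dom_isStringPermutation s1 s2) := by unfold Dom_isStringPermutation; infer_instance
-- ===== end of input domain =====

-- B replaces A's two frequency-dict builds and dict comparison with sorted(s1) == sorted(s2); objective: simpler.

-- ===== PORT A =====
-- the 'for char in s' counting loop of A (if char in hash: hash[char] += 1 else hash[char] = 1)
def pvBuildHash (l : List Char) : PySem.Dict Char Int :=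
  l.foldl (fun d c => if d.contains c then d.insert c (d.getD c 0 + 1) else d.insert c 1)
    PySem.Dict.empty

-- Python's 'd1 == d2' on dicts: same keys (order-insensitively) with the same values
def pvPyDictEq (d1 d2 : PySem.Dict Char Int) : Bool :=
  d1.size == d2.size && d1.items.all (fun p => d2.get? p.1 == some p.2)

def isStringPermutation (s1 : String) (s2 : String) : Bool :=
  if s1.toList.length ≠ s2.toList.length then false
  else
    let s1Hash := pvBuildHash s1.toList
    let s2Hash := pvBuildHash s2.toList
    if pvPyDictEq s1Hash s2Hash then true
    else false

-- ===== PORT B =====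
def isStringPermutation_alt (s1 : String) (s2 : String) : Bool :=
  PySem.List.sorted s1.toList (fun x => x) false == PySem.List.sorted s2.toList (fun x => x) false

-- ===== PRECONDITION & SPEC =====
def Spec_isStringPermutation (s1 : String) (s2 : String) (out : Bool) : Prop := out = isStringPermutation_alt s1 s2
instance (s1 : String) (s2 : String) (out : Bool) : Decidable (Spec_isStringPermutation s1 s2 out) := by unfold Spec_isStringPermutation; infer_instance

-- ===== CLAIM (what is proved, stated in full; the proofs are below) =====
def Claim_equal_isStringPermutation : Prop := ∀ (s1 : String) (s2 : String), Dom_isStringPermutation s1 s2 → Spec_isStringPermutation s1 s2 (isStringPermutation s1 s2)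

-- ===== LEMMAS AND PROOFS =====

theorem pvBuildHash_eq_counter (l : List Char) : pvBuildHash l = PySem.Dict.counter l := by
  have hstep : (fun (d : PySem.Dict Char Int) c =>
      if d.contains c then d.insert c (d.getD c 0 + 1) else d.insert c 1)
      = fun d c => d.insert c (d.getD c 0 + 1) := by
    funext d c
    by_cases h : d.contains c = true
    · simp [h]
    · simp only [Bool.not_eq_true] at h
      simp [h, PySem.Dict.getD_of_not_contains d 0 h]
  unfold pvBuildHash
  rw [hstep, PySem.Dict.foldl_insert_getD_add_one_eq_counter]

theorem counter_get?_of_mem {l : List Char} {v : Char} (h : v ∈ l) :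
    (PySem.Dict.counter l).get? v = some (l.count v) := by
  have hc : (PySem.Dict.counter l).contains v = true := by
    rw [PySem.Dict.contains_counter]
    simpa using h
  have hs := PySem.Dict.contains_eq_isSome_get? (d := PySem.Dict.counter l) (k := v)
  rw [hc] at hs
  obtain ⟨x, hx⟩ := Option.isSome_iff_exists.mp hs.symm
  have := PySem.Dict.getD_counter (xs := l) (v := v)
  rw [PySem.Dict.getD_eq_get?_getD, hx] at this
  simp at this
  rw [hx, this]
  simp

theorem mem_items_counter_iff {l : List Char} {p : Char × Int} :
    p ∈ (PySem.Dict.counter l).items ↔ p.1 ∈ l ∧ p.2 = (l.count p.1 : Int) := by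
  rw [PySem.Dict.items_counter]
  constructor
  · intro h
    simp only [List.mem_map] at h
    obtain ⟨k, hk, hp⟩ := h
    have hk' : k ∈ l := (PySem.Set.mem_ofList _ _).mp hk
    cases hp
    exact ⟨hk', rfl⟩
  · rintro ⟨h1, h2⟩
    simp only [List.mem_map]
    exact ⟨p.1, (PySem.Set.mem_ofList _ _).mpr h1, by cases p; simp_all⟩

theorem pvPyDictEq_counter_iff (l1 l2 : List Char) :
    pvPyDictEq (PySem.Dict.counter l1) (PySem.Dict.counter l2) = true ↔
      ∀ v, l1.count v = l2.count v := by
  unfold pvPyDictEq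
  rw [Bool.and_eq_true, beq_iff_eq, List.all_eq_true]
  constructor
  · rintro ⟨hsize, hall⟩ v
    by_cases hv : v ∈ l1
    · have hmem : (v, (l1.count v : Int)) ∈ (PySem.Dict.counter l1).items :=
        mem_items_counter_iff.mpr ⟨hv, rfl⟩
      have := hall _ hmem
      simp only [beq_iff_eq] at this
      have hgd := PySem.Dict.getD_eq_get?_getD (d := PySem.Dict.counter l2) (k := v) (d0 := 0)
      rw [this] at hgd
      rw [PySem.Dict.getD_counter] at hgd
      simpa using hgd.symm
    · -- v ∉ l1; show v ∉ l2 using size equality + key subset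
      have hsub : ∀ k, k ∈ (PySem.Dict.counter l1).keys →
          k ∈ (PySem.Dict.counter l2).keys := by
        intro k hk
        have hk1 : k ∈ l1 := by
          rw [PySem.Dict.keys_counter] at hk
          exact (PySem.Set.mem_ofList _ _).mp hk
        have hmem : (k, (l1.count k : Int)) ∈ (PySem.Dict.counter l1).items :=
          mem_items_counter_iff.mpr ⟨hk1, rfl⟩
        have := hall _ hmem
        simp only [beq_iff_eq] at this
        have : (PySem.Dict.counter l2).contains k = true := by
          rw [PySem.Dict.contains_eq_isSome_get?, this]; rfl
        exact (PySem.Dict.contains_iff_mem_keys _ _).mp this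
      have hnd1 := PySem.Dict.nodup_keys_counter (xs := l1)
      have hnd2 := PySem.Dict.nodup_keys_counter (xs := l2)
      have hlen : (PySem.Dict.counter l1).keys.length
          = (PySem.Dict.counter l2).keys.length := by
        have h1 : (PySem.Dict.counter l1).size
            = (PySem.Dict.counter l1).keys.length := by
          simp [PySem.Dict.size, PySem.Dict.keys]
        have h2 : (PySem.Dict.counter l2).size
            = (PySem.Dict.counter l2).keys.length := by
          simp [PySem.Dict.size, PySem.Dict.keys]
        omega
      -- finset argument: subset + equal cards + nodup ⇒ same membership
      have hfs : (PySem.Dict.counter l1).keys.toFinset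
          = (PySem.Dict.counter l2).keys.toFinset := by
        apply Finset.eq_of_subset_of_card_le
        · intro x hx
          rw [List.mem_toFinset] at hx ⊢
          exact hsub x hx
        · rw [List.toFinset_card_of_nodup hnd1, List.toFinset_card_of_nodup hnd2]
          omega
      have hv2 : v ∉ l2 := by
        intro hv2
        have : v ∈ (PySem.Dict.counter l2).keys := by
          rw [PySem.Dict.keys_counter]
          exact (PySem.Set.mem_ofList _ _).mpr hv2
        have : v ∈ (PySem.Dict.counter l1).keys := by
          have := List.mem_toFinset.mpr this
          rw [← hfs] at this
          exact List.mem_toFinset.mp this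
        rw [PySem.Dict.keys_counter] at this
        exact hv ((PySem.Set.mem_ofList _ _).mp this)
      rw [List.count_eq_zero_of_not_mem hv, List.count_eq_zero_of_not_mem hv2]
  · intro hc
    have hperm : l1.Perm l2 := List.perm_iff_count.mpr hc
    constructor
    · have : (PySem.Set.ofList l1).Perm (PySem.Set.ofList l2) := by
        apply List.perm_ext_iff_of_nodup (PySem.Set.nodup_ofList l1) (PySem.Set.nodup_ofList l2) |>.mpr
        intro x
        rw [PySem.Set.mem_ofList, PySem.Set.mem_ofList]
        exact ⟨fun h => hperm.mem_iff.mp h, fun h => hperm.mem_iff.mpr h⟩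
      have h1 : (PySem.Dict.counter l1).size = (PySem.Set.ofList l1).length := by
        simp [PySem.Dict.size, PySem.Dict.items_counter]
      have h2 : (PySem.Dict.counter l2).size = (PySem.Set.ofList l2).length := by
        simp [PySem.Dict.size, PySem.Dict.items_counter]
      rw [h1, h2, this.length_eq]
    · intro p hp
      obtain ⟨hmem, hval⟩ := mem_items_counter_iff.mp hp
      have hm2 : p.1 ∈ l2 := hperm.mem_iff.mp hmem
      rw [counter_get?_of_mem hm2, beq_iff_eq, hval, hc p.1]
      simp

theorem sorted_count_char (l1 l2 : List Char) :
    (PySem.List.sorted l1 (fun x => x) false == PySem.List.sorted l2 (fun x => x) false)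
      = decide (∀ v, l1.count v = l2.count v) := by
  have hiff : (PySem.List.sorted l1 (fun x => x) false = PySem.List.sorted l2 (fun x => x) false)
      ↔ ∀ v, l1.count v = l2.count v := by
    rw [PySem.List.sorted_id_eq_sorted_id_iff_perm]; exact List.perm_iff_count
  by_cases h : ∀ v, l1.count v = l2.count v
  · simp [hiff.mpr h, h]
  · simp only [h, decide_false]
    exact beq_eq_false_iff_ne.mpr (fun he => h (hiff.mp he))

-- ===== VERDICT (by name: the statement is the Claim_ definition above) =====
theorem isStringPermutation_spec : Claim_equal_isStringPermutation := by
  intro s1 s2 _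
  unfold Spec_isStringPermutation isStringPermutation isStringPermutation_alt
  by_cases hlen : s1.toList.length = s2.toList.length
  · simp only [hlen, ne_eq, not_true_eq_false, if_false]
    rw [pvBuildHash_eq_counter, pvBuildHash_eq_counter]
    by_cases hd : pvPyDictEq (PySem.Dict.counter s1.toList) (PySem.Dict.counter s2.toList) = true
    · have hc := (pvPyDictEq_counter_iff _ _).mp hd
      simp [hd, sorted_count_char, hc]
    · rw [Bool.not_eq_true] at hd
      have hnc : ¬ ∀ v, s1.toList.count v = s2.toList.count v := fun hc =>
        absurd ((pvPyDictEq_counter_iff _ _).mpr hc) (by simp [hd])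
      simp [hd, sorted_count_char, hnc]
  · simp only [ne_eq, hlen, not_false_eq_true, if_true]
    symm
    rw [Bool.eq_false_iff]
    intro h
    rw [beq_iff_eq] at h
    have := congrArg List.length h
    rw [PySem.List.length_sorted, PySem.List.length_sorted] at this
    exact hlen this
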